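-- pv_equiv track=rewrite | github.com/DaVinci42/LeetCode | Python/475.Heaters.py | _min_radius
-- ===== SOURCE A (Python) =====
-- def _min_radius(position, heaters):
--     left, right = 0, len(heaters) - 1
--     if position <= heaters[left]:
--         return heaters[left] - position
--     if position >= heaters[right]:
--         return position - heaters[right]
--
--     while right - left > 1:
--         mid = int((left + right) / 2)
--         mid_position = heaters[mid]
--         if mid_position == position:
--             return 0
--         if mid_position > position:
--             right = mid
--         if mid_position < position:
--             left = mid
--     left_v, right_v = heaters[left], heaters[right]
--     if position - left_v >= right_v - position:
--         return right_v - position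
--     else:
--         return position - left_v
-- ===== SOURCE B (Python) =====
-- def _bracket(position, heaters, left, right):
--     if right - left <= 1:
--         return min(position - heaters[left], heaters[right] - position)
--     mid = (left + right) // 2
--     v = heaters[mid]
--     if v == position:
--         return 0
--     if v < position:
--         return _bracket(position, heaters, mid, right)
--     return _bracket(position, heaters, left, mid)
--
--
-- def _min_radius(position, heaters):
--     first, last = heaters[0], heaters[-1]
--     if position <= first:
--         return first - position
--     if position >= last:
--         return position - last
--     return _bracket(position, heaters, 0, len(heaters) - 1)
-- ===== Notes on version B (the rewrite author's own statement) =====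
-- stated objective: alternative
-- what changed: A's while-loop binary search (mutable left/right, three sequential ifs, a final >=-comparison) is re-expressed as a structural recursion on the shrinking bracket whose base case is a min() combine; a linear min-scan was rejected because A's value on unsorted input depends on the search trajectory, so exact equivalence on the full domain pins the search itself.
import Mathlib
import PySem

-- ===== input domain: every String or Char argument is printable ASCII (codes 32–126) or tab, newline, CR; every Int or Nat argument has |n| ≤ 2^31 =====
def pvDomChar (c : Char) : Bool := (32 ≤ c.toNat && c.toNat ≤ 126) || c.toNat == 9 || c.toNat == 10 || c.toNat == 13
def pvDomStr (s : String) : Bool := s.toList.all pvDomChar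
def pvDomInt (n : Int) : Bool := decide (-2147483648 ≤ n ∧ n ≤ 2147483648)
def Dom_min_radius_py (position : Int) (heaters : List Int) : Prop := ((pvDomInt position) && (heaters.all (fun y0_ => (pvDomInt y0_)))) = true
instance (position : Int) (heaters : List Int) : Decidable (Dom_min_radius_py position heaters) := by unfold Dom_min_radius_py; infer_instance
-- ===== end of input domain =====

-- B re-expresses A's bracketing search as a structural recursion combined with min();
-- same asymptotic cost (a linear min-scan would NOT match A on unsorted input, where
-- A's value depends on the search trajectory, so the search itself is kept).

-- midpoint of a bracketing interval lies strictly inside it; cited by the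
-- termination proofs of both ports (decreasing_by)
theorem pvMid_strict (l r : Int) (h : 1 < r - l) :
    l < PySem.Int.floordiv (l + r) 2 ∧ PySem.Int.floordiv (l + r) 2 < r := by
  have h1 := PySem.Int.floordiv_mul_add_mod (l + r) 2
  have h2 := PySem.Int.mod_nonneg (l + r) (b := 2) (by norm_num)
  have h3 := PySem.Int.mod_lt (l + r) (b := 2) (by norm_num)
  omega

-- measure lemmas cited by the ports' decreasing_by (named, so the termination
-- proof terms inside the definitions stay small)
theorem pvDecA (l r m v p : Int) (hw : 1 < r - l) (hm : l < m ∧ m < r) (hne : ¬ v = p) :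
    ((if v > p then m else r) - (if v < p then m else l)).toNat < (r - l).toNat := by
  split_ifs <;> omega

theorem pvDecLeft (l r m : Int) (hm : l < m ∧ m < r) : (r - m).toNat < (r - l).toNat := by
  omega

theorem pvDecRight (l r m : Int) (hm : l < m ∧ m < r) : (m - l).toNat < (r - l).toNat := by
  omega

-- ===== PORT A =====
-- A's while loop (state: left, right).  int((left + right) / 2) is exact floor
-- division here: on every reachable state 0 ≤ left < right.  heaters[i] is
-- ported as (pyGet? …).getD 0; every index reached is in range for a nonempty
-- list (Pre_ excludes [], where Python raises IndexError at heaters[left]).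
def pvALoop (position : Int) (heaters : List Int) (left right : Int) : Int :=
  if hw : right - left > 1 then
    have hmid := pvMid_strict left right hw
    -- mid = int((left + right) / 2); mid_position = heaters[mid]
    if heq : (PySem.List.pyGet? heaters (PySem.Int.floordiv (left + right) 2)).getD 0 = position then
      0
    else
      -- the two sequential ifs 'if mid_position > position: right = mid' and
      -- 'if mid_position < position: left = mid' (mutually exclusive here)
      pvALoop position heaters
        (if (PySem.List.pyGet? heaters (PySem.Int.floordiv (left + right) 2)).getD 0 < position
         then PySem.Int.floordiv (left + right) 2 else left)
        (if (PySem.List.pyGet? heaters (PySem.Int.floordiv (left + right) 2)).getD 0 > position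
         then PySem.Int.floordiv (left + right) 2 else right)
  else
    -- left_v, right_v = heaters[left], heaters[right]
    if (PySem.List.pyGet? heaters right).getD 0 - position ≤ position - (PySem.List.pyGet? heaters left).getD 0
    then (PySem.List.pyGet? heaters right).getD 0 - position
    else position - (PySem.List.pyGet? heaters left).getD 0
termination_by (right - left).toNat
decreasing_by
  exact pvDecA left right (PySem.Int.floordiv (left + right) 2)
    ((PySem.List.pyGet? heaters (PySem.Int.floordiv (left + right) 2)).getD 0) position hw hmid heq

def min_radius_py (position : Int) (heaters : List Int) : Int :=
  -- left, right = 0, len(heaters) - 1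
  if position ≤ (PySem.List.pyGet? heaters 0).getD 0 then
    (PySem.List.pyGet? heaters 0).getD 0 - position
  else if position ≥ (PySem.List.pyGet? heaters ((heaters.length : Int) - 1)).getD 0 then
    position - (PySem.List.pyGet? heaters ((heaters.length : Int) - 1)).getD 0
  else
    pvALoop position heaters 0 ((heaters.length : Int) - 1)

-- ===== PORT B =====
-- structural recursion on the shrinking bracket; base case combines with min
def pvBracket (position : Int) (heaters : List Int) (left right : Int) : Int :=
  if hb : right - left ≤ 1 then
    min (position - (PySem.List.pyGet? heaters left).getD 0)
        ((PySem.List.pyGet? heaters right).getD 0 - position)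
  else
    have hmid := pvMid_strict left right (by omega)
    if hv : (PySem.List.pyGet? heaters (PySem.Int.floordiv (left + right) 2)).getD 0 = position then
      0
    else if (PySem.List.pyGet? heaters (PySem.Int.floordiv (left + right) 2)).getD 0 < position then
      pvBracket position heaters (PySem.Int.floordiv (left + right) 2) right
    else
      pvBracket position heaters left (PySem.Int.floordiv (left + right) 2)
termination_by (right - left).toNat
decreasing_by
  · exact pvDecLeft left right (PySem.Int.floordiv (left + right) 2) hmid
  · exact pvDecRight left right (PySem.Int.floordiv (left + right) 2) hmid

def min_radius_py_alt (position : Int) (heaters : List Int) : Int :=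
  -- first, last = heaters[0], heaters[-1]
  if position ≤ (PySem.List.pyGet? heaters 0).getD 0 then
    (PySem.List.pyGet? heaters 0).getD 0 - position
  else if (PySem.List.pyGet? heaters (-1)).getD 0 ≤ position then
    position - (PySem.List.pyGet? heaters (-1)).getD 0
  else
    pvBracket position heaters 0 ((heaters.length : Int) - 1)

-- ===== PRECONDITION & SPEC =====
-- Pre_ excludes only the empty list, on which Python A raises IndexError at heaters[left]
def Pre_min_radius_py (position : Int) (heaters : List Int) : Prop := heaters ≠ []
instance (position : Int) (heaters : List Int) : Decidable (Pre_min_radius_py position heaters) := by unfold Pre_min_radius_py; infer_instance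
def pvWitness_min_radius_py : Int × List Int := (3, [1, 4])

def Spec_min_radius_py (position : Int) (heaters : List Int) (out : Int) : Prop := out = min_radius_py_alt position heaters
instance (position : Int) (heaters : List Int) (out : Int) : Decidable (Spec_min_radius_py position heaters out) := by unfold Spec_min_radius_py; infer_instance

-- ===== CLAIM (what is proved, stated in full; the proofs are below) =====
def Claim_equal_min_radius_py : Prop := ∀ (position : Int) (heaters : List Int), Dom_min_radius_py position heaters → Pre_min_radius_py position heaters → Spec_min_radius_py position heaters (min_radius_py position heaters)

-- ===== LEMMAS AND PROOFS =====

-- the loop and the recursion compute the same value from any interval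
theorem pvLoop_eq_bracket (position : Int) (heaters : List Int) :
    ∀ (n : Nat) (left right : Int), (right - left).toNat ≤ n →
      pvALoop position heaters left right = pvBracket position heaters left right := by
  intro n
  induction n with
  | zero =>
    intro l r h
    rw [pvALoop, pvBracket, dif_neg (by omega : ¬ r - l > 1), dif_pos (by omega : r - l ≤ 1)]
    rw [min_def]
    split_ifs <;> omega
  | succ n ih =>
    intro l r h
    rw [pvALoop, pvBracket]
    by_cases hw : r - l > 1
    · rw [dif_pos hw, dif_neg (by omega : ¬ r - l ≤ 1)]
      have hmid := pvMid_strict l r hw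
      by_cases hv : (PySem.List.pyGet? heaters (PySem.Int.floordiv (l + r) 2)).getD 0 = position
      · rw [dif_pos hv, dif_pos hv]
      · rw [dif_neg hv, dif_neg hv]
        by_cases hlt : (PySem.List.pyGet? heaters (PySem.Int.floordiv (l + r) 2)).getD 0 < position
        · rw [if_pos hlt, if_pos hlt, if_neg (by omega)]
          exact ih _ _ (by omega)
        · rw [if_neg hlt, if_neg hlt, if_pos (by omega)]
          exact ih _ _ (by omega)
    · rw [dif_neg hw, dif_pos (by omega : r - l ≤ 1), min_def]
      split_ifs <;> omega

-- heaters[-1] = heaters[len(heaters) - 1] on a nonempty list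
theorem pvLast_idx (heaters : List Int) (h : heaters ≠ []) :
    PySem.List.pyGet? heaters (-1) = PySem.List.pyGet? heaters ((heaters.length : Int) - 1) := by
  have hlen : 0 < heaters.length := List.length_pos_iff.mpr h
  have h1 : ((heaters.length : Int) - 1) = ((heaters.length - 1 : Nat) : Int) := by omega
  rw [h1, PySem.List.pyGet?_natCast, PySem.List.pyGet?_neg_one,
      List.getLast?_eq_getElem?]

-- ===== VERDICT (by name: the statement is the Claim_ definition above) =====
theorem min_radius_py_spec : Claim_equal_min_radius_py := by
  intro position heaters _ hpre
  unfold Spec_min_radius_py min_radius_py min_radius_py_alt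
  rw [pvLast_idx heaters hpre]
  by_cases h1 : position ≤ (PySem.List.pyGet? heaters 0).getD 0
  · rw [if_pos h1, if_pos h1]
  · rw [if_neg h1, if_neg h1]
    by_cases h2 : position ≥ (PySem.List.pyGet? heaters ((heaters.length : Int) - 1)).getD 0
    · rw [if_pos h2, if_pos h2]
    · rw [if_neg h2, if_neg (by omega : ¬ (PySem.List.pyGet? heaters ((heaters.length : Int) - 1)).getD 0 ≤ position)]
      exact pvLoop_eq_bracket position heaters _ 0 _ (le_refl _)
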